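-- pv_equiv track=rewrite | github.com/aleksulsk/Lesson-1 | module_2_hard.py | code_pairs
-- ===== SOURCE A (Python) =====
-- def code_pairs(num):
--     list_check = []
--     for i in range(3, num):
--         if num % i == 0:
--             for t in range(1, i):
--                 if t != (i - t):
--                     lis = []
--                     pairNumOne = t
--                     pairNumTwo = (i - t)
--                     for j in range(1):
--                         lis.append(pairNumOne)
--                         lis.append(pairNumTwo)
--                     list_check.append(lis)
--
--     for e in range(1, num):
--         if e != (num - e):
--             lis = []
--             pairNumOne = e
--             pairNumTwo = (num - e)
--             for j in range(1):
--                 lis.append(pairNumOne)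
--                 lis.append(pairNumTwo)
--                 list_check.append(lis)
--     return list_check
-- ===== SOURCE B (Python) =====
-- def code_pairs(num):
--     # find proper divisors of num in [3, num) by trial division up to sqrt(num)
--     divs = set()
--     i = 1
--     while i * i <= num:
--         if num % i == 0:
--             if 3 <= i < num:
--                 divs.add(i)
--             j = num // i
--             if 3 <= j < num:
--                 divs.add(j)
--         i += 1
--     out = []
--     for d in sorted(divs):
--         for t in range(1, d):
--             if t != d - t:
--                 out.append([t, d - t])
--     for e in range(1, num):
--         if e != num - e:
--             out.append([e, num - e])
--     return out
-- ===== Notes on version B (the rewrite author's own statement) =====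
-- stated objective: faster
-- what changed: B finds the divisors of num in [3,num) by trial division only up to sqrt(num), collecting i and num//i into a set that is sorted afterwards, instead of A's full modulo scan over range(3,num); pair emission is a plain double loop without A's 'for j in range(1)' construction.
import Mathlib
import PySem

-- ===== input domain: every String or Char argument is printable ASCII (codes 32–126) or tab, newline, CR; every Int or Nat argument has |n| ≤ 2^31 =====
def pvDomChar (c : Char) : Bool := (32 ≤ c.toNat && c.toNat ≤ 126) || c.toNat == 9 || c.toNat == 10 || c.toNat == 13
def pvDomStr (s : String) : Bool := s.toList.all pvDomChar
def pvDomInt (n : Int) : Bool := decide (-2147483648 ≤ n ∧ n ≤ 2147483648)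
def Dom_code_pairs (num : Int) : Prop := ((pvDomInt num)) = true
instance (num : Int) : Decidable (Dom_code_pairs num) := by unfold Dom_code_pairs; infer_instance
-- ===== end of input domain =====

-- B replaces A's full modulo scan of range(3,num) by a sqrt(num) trial-division collect-and-sort
-- of the divisors; the pair emission stays a plain double loop (objective: faster by a constant factor).

-- ===== PORT A =====
def code_pairs (num : Int) : List (List Int) :=
  -- first loop: for i in range(3, num): if num % i == 0: for t in range(1, i): …
  let list1 : List (List Int) :=
    (PySem.List.pyRange 3 num).foldl (fun list_check i =>
      if PySem.Int.mod num i == 0 then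
        (PySem.List.pyRange 1 i).foldl (fun lc t =>
          if t ≠ i - t then
            let lis : List Int := []
            let pairNumOne := t
            let pairNumTwo := i - t
            let lis := (PySem.List.pyRange 0 1).foldl
              (fun l _ => (l ++ [pairNumOne]) ++ [pairNumTwo]) lis
            lc ++ [lis]
          else lc) list_check
      else list_check) []
  -- second loop: for e in range(1, num): … (list_check.append is inside the 'for j in range(1)')
  (PySem.List.pyRange 1 num).foldl (fun list_check e =>
    if e ≠ num - e then
      let lis : List Int := []
      let pairNumOne := e
      let pairNumTwo := num - e
      let st := (PySem.List.pyRange 0 1).foldl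
        (fun (p : List Int × List (List Int)) _ =>
          let l1 := p.1 ++ [pairNumOne]
          let l2 := l1 ++ [pairNumTwo]
          (l2, p.2 ++ [l2])) (lis, list_check)
      st.2
    else list_check) list1

-- ===== PORT B =====
-- the while loop 'i = 1; while i*i <= num: …; i += 1' of Source B; fuel only makes the recursion
-- structural (fuel num.toNat+1 is enough since i*i ≤ num forces i ≤ num)
def pvCollectGo (num : Int) : Nat → Int → PySem.Set Int → PySem.Set Int
  | 0, _, s => s
  | f + 1, i, s =>
    if i * i ≤ num then
      pvCollectGo num f (i + 1)
        (if PySem.Int.mod num i == 0 then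
          let s1 := if 3 ≤ i ∧ i < num then PySem.Set.add s i else s
          let j := PySem.Int.floordiv num i
          if 3 ≤ j ∧ j < num then PySem.Set.add s1 j else s1
        else s)
    else s

def code_pairs_alt (num : Int) : List (List Int) :=
  let divs := pvCollectGo num (num.toNat + 1) 1 PySem.Set.empty
  let out : List (List Int) :=
    (PySem.List.sorted divs (fun x => x)).foldl (fun out d =>
      (PySem.List.pyRange 1 d).foldl (fun out t =>
        if t ≠ d - t then out ++ [[t, d - t]] else out) out) []
  (PySem.List.pyRange 1 num).foldl (fun out e =>
    if e ≠ num - e then out ++ [[e, num - e]] else out) out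

-- ===== PRECONDITION & SPEC =====
def Spec_code_pairs (num : Int) (out : List (List Int)) : Prop := out = code_pairs_alt num
instance (num : Int) (out : List (List Int)) : Decidable (Spec_code_pairs num out) := by unfold Spec_code_pairs; infer_instance

-- ===== CLAIM (what is proved, stated in full; the proofs are below) =====
def Claim_equal_code_pairs : Prop := ∀ (num : Int), Dom_code_pairs num → Spec_code_pairs num (code_pairs num)

-- ===== LEMMAS AND PROOFS =====

theorem pvCollectGo_nodup (num : Int) (f : Nat) :
    ∀ (i : Int) (s : PySem.Set Int), s.Nodup → (pvCollectGo num f i s).Nodup := by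
  induction f with
  | zero => intro i s hs; simpa [pvCollectGo] using hs
  | succ f ih =>
    intro i s hs
    simp only [pvCollectGo]
    split
    · apply ih
      split
      · split
        · split
          · exact PySem.Set.nodup_add _ _ (PySem.Set.nodup_add _ _ hs)
          · exact PySem.Set.nodup_add _ _ hs
        · split
          · exact PySem.Set.nodup_add _ _ hs
          · exact hs
      · exact hs
    · exact hs

theorem pvCollectGo_mem (num : Int) (f : Nat) :
    ∀ (i : Int), 1 ≤ i → (∀ k : Int, i ≤ k → k * k ≤ num → k < i + f) →
    ∀ (s : PySem.Set Int) (x : Int),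
      x ∈ pvCollectGo num f i s ↔
        x ∈ s ∨ ∃ k : Int, i ≤ k ∧ k * k ≤ num ∧ k ∣ num ∧
          (x = k ∨ x = PySem.Int.floordiv num k) ∧ 3 ≤ x ∧ x < num := by
  induction f with
  | zero =>
    intro i hi hf s x
    simp only [pvCollectGo]
    constructor
    · exact Or.inl
    · rintro (h | ⟨k, hk1, hk2, _⟩)
      · exact h
      · exact absurd (hf k hk1 hk2) (by omega)
  | succ f ih =>
    intro i hi hf s x
    simp only [pvCollectGo]
    split
    · rename_i hii
      rw [ih (i + 1) (by omega) (fun k hk1 hk2 => by have := hf k (by omega) hk2; omega)]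
      have hmem : ∀ s' : PySem.Set Int,
          x ∈ (if PySem.Int.mod num i == 0 then
            let s1 := if 3 ≤ i ∧ i < num then PySem.Set.add s' i else s'
            let j := PySem.Int.floordiv num i
            if 3 ≤ j ∧ j < num then PySem.Set.add s1 j else s1
          else s') ↔
          x ∈ s' ∨ (i ∣ num ∧
            ((x = i ∨ x = PySem.Int.floordiv num i) ∧ 3 ≤ x ∧ x < num)) := by
        intro s'
        by_cases hd : i ∣ num
        · rw [if_pos (by rw [beq_iff_eq, PySem.Int.mod_eq_zero_iff_dvd]; exact hd)]
          by_cases c1 : 3 ≤ i ∧ i < num <;>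
            by_cases c2 : 3 ≤ PySem.Int.floordiv num i ∧ PySem.Int.floordiv num i < num <;>
            simp [c1, c2, PySem.Set.mem_add, hd]
          · constructor
            · rintro ((h | rfl) | rfl)
              · exact Or.inl h
              · exact Or.inr ⟨Or.inl rfl, c1.1, c1.2⟩
              · exact Or.inr ⟨Or.inr rfl, c2.1, c2.2⟩
            · rintro (h | ⟨rfl | rfl, _, _⟩)
              · exact Or.inl (Or.inl h)
              · exact Or.inl (Or.inr rfl)
              · exact Or.inr rfl
          · constructor
            · rintro (h | rfl)
              · exact Or.inl h
              · exact Or.inr ⟨Or.inl rfl, c1.1, c1.2⟩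
            · rintro (h | ⟨rfl | rfl, h3, h4⟩)
              · exact Or.inl h
              · exact Or.inr rfl
              · exact absurd ⟨h3, h4⟩ c2
          · constructor
            · rintro (h | rfl)
              · exact Or.inl h
              · exact Or.inr ⟨Or.inr rfl, c2.1, c2.2⟩
            · rintro (h | ⟨rfl | rfl, h3, h4⟩)
              · exact Or.inl h
              · exact absurd ⟨h3, h4⟩ c1
              · exact Or.inr rfl
          · rintro (rfl | rfl) h3 h4
            · exact absurd ⟨h3, h4⟩ c1
            · exact absurd ⟨h3, h4⟩ c2
        · rw [if_neg (by rw [beq_iff_eq, PySem.Int.mod_eq_zero_iff_dvd]; exact hd)]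
          tauto
      rw [hmem]
      constructor
      · rintro ((h | ⟨hd, hx⟩) | ⟨k, hk1, hk2, hk3, hk4⟩)
        · exact Or.inl h
        · exact Or.inr ⟨i, le_refl i, hii, hd, hx⟩
        · exact Or.inr ⟨k, by omega, hk2, hk3, hk4⟩
      · rintro (h | ⟨k, hk1, hk2, hk3, hk4⟩)
        · exact Or.inl (Or.inl h)
        · rcases eq_or_lt_of_le hk1 with heq | hlt
          · exact Or.inl (Or.inr ⟨heq ▸ hk3, heq ▸ hk4⟩)
          · exact Or.inr ⟨k, by omega, hk2, hk3, hk4⟩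
    · rename_i hii
      constructor
      · exact Or.inl
      · rintro (h | ⟨k, hk1, hk2, _⟩)
        · exact h
        · exfalso
          have : i * i ≤ k * k := by nlinarith
          omega

-- the collected set holds exactly the divisors of num in [3, num)
theorem pvCollect_mem (num x : Int) :
    x ∈ pvCollectGo num (num.toNat + 1) 1 PySem.Set.empty ↔
      3 ≤ x ∧ x < num ∧ x ∣ num := by
  rw [pvCollectGo_mem num (num.toNat + 1) 1 (by omega)
      (fun k hk1 hk2 => by
        have hkn : k ≤ num := by nlinarith
        omega)]
  constructor
  · rintro (h | ⟨k, hk1, hk2, hk3, hx, h3, hlt⟩)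
    · simp [PySem.Set.empty] at h
    · refine ⟨h3, hlt, ?_⟩
      rcases hx with rfl | rfl
      · exact hk3
      · obtain ⟨m, rfl⟩ := hk3
        have hk0 : 0 < k := by omega
        rw [PySem.Int.floordiv_eq_ediv_of_pos hk0, Int.mul_ediv_cancel_left m (by omega)]
        exact ⟨k, mul_comm k m⟩
  · rintro ⟨h3, hlt, hd⟩
    right
    have hnum : 0 < num := by omega
    by_cases hxx : x * x ≤ num
    · exact ⟨x, by omega, hxx, hd, Or.inl rfl, h3, hlt⟩
    · obtain ⟨m, hm⟩ := hd
      have hx0 : 0 < x := by omega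
      have hm0 : 0 < m := by nlinarith
      have hmx : m < x := by nlinarith
      have hdm : m ∣ num := ⟨x, by rw [hm, mul_comm]⟩
      have hfl : PySem.Int.floordiv num m = x := by
        rw [PySem.Int.floordiv_eq_ediv_of_pos hm0, hm, mul_comm x m,
          Int.mul_ediv_cancel_left x (by omega)]
      exact ⟨m, by omega, by nlinarith, hdm, Or.inr hfl.symm, h3, hlt⟩

-- sorted(divs) is exactly [i for i in range(3, num) if num % i == 0]
theorem pvSortedDivs (num : Int) :
    PySem.List.sorted (pvCollectGo num (num.toNat + 1) 1 PySem.Set.empty) (fun x => x) =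
      (PySem.List.pyRange 3 num).filter (fun i => PySem.Int.mod num i == 0) := by
  apply PySem.List.sorted_eq_of_perm_of_pairwise_lt
  · rw [List.perm_ext_iff_of_nodup
      (List.Nodup.filter _ (PySem.List.pairwise_lt_pyRange_one 3 num).nodup)
      (pvCollectGo_nodup num _ 1 PySem.Set.empty (by simp [PySem.Set.empty]))]
    intro x
    rw [pvCollect_mem, List.mem_filter, PySem.List.mem_pyRange_one,
      beq_iff_eq, PySem.Int.mod_eq_zero_iff_dvd]
    tauto
  · exact List.Pairwise.filter _ (PySem.List.pairwise_lt_pyRange_one 3 num)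

-- ===== VERDICT (by name: the statement is the Claim_ definition above) =====
theorem code_pairs_spec : Claim_equal_code_pairs := by
  intro num _
  unfold Spec_code_pairs code_pairs code_pairs_alt
  -- clean up A's 'for j in range(1)' folds: pyRange 0 1 = [0]
  have hr : PySem.List.pyRange 0 1 = [0] := by decide
  simp only [hr, List.foldl_cons, List.foldl_nil]
  rw [pvSortedDivs, List.foldl_filter]
  simp only [List.nil_append, List.singleton_append]
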